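-- pv_equiv track=rewrite | github.com/samankhan3210/py110 | lesson_3/tic_tac_toe.py | get_horizontal_coordinates
-- ===== SOURCE A (Python) =====
-- BOARD_LENGTH = 3
--
-- def get_horizontal_coordinates(board, board_row_index, mark, max_move_len):
--     ''' returns the horizontal coordinates of a player on the board in a row
--     that are either winning or about to win, we can set this based on the
--     max_move_len argument '''
--     horizontal_moves = []
--     for j in range(BOARD_LENGTH):
--         if board[board_row_index][j] == mark:
--             horizontal_moves.append((board_row_index, j))
--
--         if board[board_row_index][j] not in [mark, " "]:
--             horizontal_moves = []
--             break
--
--     return horizontal_moves if len(horizontal_moves) == max_move_len else []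
-- ===== SOURCE B (Python) =====
-- BOARD_LENGTH = 3
--
-- def get_horizontal_coordinates(board, board_row_index, mark, max_move_len):
--     def scan(cells, j):
--         # offsets of `mark` among the first BOARD_LENGTH cells, or None on an opponent
--         if j == BOARD_LENGTH:
--             return []
--         head = cells[0]
--         if head == mark:
--             rest = scan(cells[1:], j + 1)
--             return None if rest is None else [j] + rest
--         if head == " ":
--             return scan(cells[1:], j + 1)
--         return None  # opponent: short-circuit, discard everything
--     offsets = scan(board[board_row_index], 0)
--     if offsets is None or len(offsets) != max_move_len:
--         return []
--     return [(board_row_index, j) for j in offsets]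
-- ===== Notes on version B (the rewrite author's own statement) =====
-- stated objective: alternative
-- what changed: Replaces A's iterative fused collect-and-reset loop (append marks to a list, clear it and break on an opponent) with a structural recursion over the row that returns an Option/None-style value: None propagates an opponent upward, otherwise the mark offsets are built in the return values and mapped to coordinates afterwards.
import Mathlib
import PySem

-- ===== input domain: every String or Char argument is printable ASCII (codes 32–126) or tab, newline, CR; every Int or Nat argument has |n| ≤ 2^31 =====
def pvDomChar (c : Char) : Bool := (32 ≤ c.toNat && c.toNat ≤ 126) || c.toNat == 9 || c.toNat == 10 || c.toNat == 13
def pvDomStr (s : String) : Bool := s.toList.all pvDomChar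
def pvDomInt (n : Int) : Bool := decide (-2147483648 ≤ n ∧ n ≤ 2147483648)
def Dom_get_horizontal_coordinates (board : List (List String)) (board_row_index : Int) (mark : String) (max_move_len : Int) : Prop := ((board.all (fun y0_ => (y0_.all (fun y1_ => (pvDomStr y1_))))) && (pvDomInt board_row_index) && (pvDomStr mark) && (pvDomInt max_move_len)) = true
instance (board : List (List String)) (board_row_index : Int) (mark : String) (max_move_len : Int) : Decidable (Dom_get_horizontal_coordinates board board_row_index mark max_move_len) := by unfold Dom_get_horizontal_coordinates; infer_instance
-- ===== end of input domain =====

-- B replaces A's iterative collect-and-reset loop by a structural recursion over the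
-- row returning an Option (none = opponent seen); an alternative decomposition.

-- ===== PORT A =====
-- board[board_row_index][j] as A writes it (none = IndexError)
def pvCellA (board : List (List String)) (i j : Int) : Option String :=
  (PySem.List.pyGet? board i).bind (fun row => PySem.List.pyGet? row j)

-- A's for-loop with the break; the `none` branch (IndexError) is excluded by Pre_
def pvALoop (board : List (List String)) (bri : Int) (mark : String) :
    List Int → List (Int × Int) → List (Int × Int)
  | [], acc => acc
  | j :: js, acc =>
    match pvCellA board bri j with
    | none => acc
    | some v =>
      let acc' := if v == mark then acc ++ [(bri, j)] else acc
      if !(v == mark || v == " ") then [] else pvALoop board bri mark js acc'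

def get_horizontal_coordinates (board : List (List String)) (board_row_index : Int) (mark : String) (max_move_len : Int) : List (Int × Int) :=
  let horizontal_moves := pvALoop board board_row_index mark (PySem.List.pyRange 0 3 1) []
  if ((horizontal_moves.length : Int) = max_move_len) then horizontal_moves else []

-- ===== PORT B =====
-- B's recursive scan: offsets of `mark` among the first 3 cells, none on an opponent.
-- cells[0] on an empty list is Python's IndexError, excluded by Pre_ (here: stop).
def pvScanB (mark : String) : List String → Int → Option (List Int)
  | cells, j =>
    if j = 3 then some []
    else
      match cells with
      | [] => some []   -- Python raises IndexError here; excluded by Pre_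
      | head :: tail =>
        if head == mark then (pvScanB mark tail (j + 1)).map (fun rest => j :: rest)
        else if head == " " then pvScanB mark tail (j + 1)
        else none

def get_horizontal_coordinates_alt (board : List (List String)) (board_row_index : Int) (mark : String) (max_move_len : Int) : List (Int × Int) :=
  match PySem.List.pyGet? board board_row_index with
  | none => []   -- IndexError, excluded by Pre_
  | some row =>
    match pvScanB mark row 0 with
    | none => []
    | some offsets =>
      if ((offsets.length : Int) = max_move_len) then offsets.map (fun j => (board_row_index, j)) else []

-- ===== PRECONDITION & SPEC =====
-- Pre_: exactly the inputs where A returns (no IndexError): the row index is valid and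
-- either the row has ≥ 3 cells or the loop breaks on an opponent cell before running off the row.
def Pre_get_horizontal_coordinates (board : List (List String)) (board_row_index : Int) (mark : String) (max_move_len : Int) : Prop :=
  ((PySem.List.pyGet? board board_row_index).elim false
    (fun row => decide (3 ≤ row.length) || row.any (fun v => !(v == mark || v == " ")))) = true
instance (board : List (List String)) (board_row_index : Int) (mark : String) (max_move_len : Int) : Decidable (Pre_get_horizontal_coordinates board board_row_index mark max_move_len) := by unfold Pre_get_horizontal_coordinates; infer_instance

def pvWitness_get_horizontal_coordinates : List (List String) × Int × String × Int :=
  ([["X", " ", "X"], ["O", "O", " "]], 1, "O", 2)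

def Spec_get_horizontal_coordinates (board : List (List String)) (board_row_index : Int) (mark : String) (max_move_len : Int) (out : List (Int × Int)) : Prop := out = get_horizontal_coordinates_alt board board_row_index mark max_move_len
instance (board : List (List String)) (board_row_index : Int) (mark : String) (max_move_len : Int) (out : List (Int × Int)) : Decidable (Spec_get_horizontal_coordinates board board_row_index mark max_move_len out) := by unfold Spec_get_horizontal_coordinates; infer_instance

-- ===== CLAIM =====
def Claim_equal_get_horizontal_coordinates : Prop := ∀ (board : List (List String)) (board_row_index : Int) (mark : String) (max_move_len : Int), Dom_get_horizontal_coordinates board board_row_index mark max_move_len → Pre_get_horizontal_coordinates board board_row_index mark max_move_len → Spec_get_horizontal_coordinates board board_row_index mark max_move_len (get_horizontal_coordinates board board_row_index mark max_move_len)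

-- ===== LEMMAS AND PROOFS =====

-- ===== VERDICT =====
set_option maxHeartbeats 2000000 in
theorem get_horizontal_coordinates_spec : Claim_equal_get_horizontal_coordinates := by
  intro board bri mark mml _ hpre
  unfold Spec_get_horizontal_coordinates
  cases hb : PySem.List.pyGet? board bri with
  | none => exact absurd hpre (by simp [Pre_get_horizontal_coordinates, hb])
  | some row =>
    have hpre' : 3 ≤ row.length ∨ (row.any fun v => !(v == mark || v == " ")) = true := by
      simpa [Pre_get_horizontal_coordinates, hb, Bool.or_eq_true] using hpre
    have hr3 : PySem.List.pyRange 0 3 1 = [0, 1, 2] := by decide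
    match row, hpre' with
    | [], hpre' => simp at hpre'
    | [a], hpre' =>
        have ha : ¬(a == mark || a == " ") = true := by simpa using hpre'
        have h0 : PySem.List.pyGet? [a] (0:Int) = some a := by
          simp [PySem.List.pyGet?, PySem.List.pyIdx?]
        have h1 : PySem.List.pyGet? [a] (1:Int) = none := by
          simp [PySem.List.pyGet?, PySem.List.pyIdx?]
        simp only [get_horizontal_coordinates, get_horizontal_coordinates_alt,
          pvALoop, pvCellA, hb, hr3, Option.bind_some, h0, h1]
        simp only [Bool.or_eq_true, not_or, Bool.not_eq_true] at ha
        simp [pvScanB, ha.1, ha.2]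
    | [a, b], hpre' =>
        have h0 : PySem.List.pyGet? [a, b] (0:Int) = some a := by
          simp [PySem.List.pyGet?, PySem.List.pyIdx?]
        have h1 : PySem.List.pyGet? [a, b] (1:Int) = some b := by
          simp [PySem.List.pyGet?, PySem.List.pyIdx?]
        have h2 : PySem.List.pyGet? [a, b] (2:Int) = none := by
          simp [PySem.List.pyGet?, PySem.List.pyIdx?]
        simp only [get_horizontal_coordinates, get_horizontal_coordinates_alt,
          pvALoop, pvCellA, hb, hr3, Option.bind_some, h0, h1, h2]
        simp only [pvScanB]
        by_cases ea : a == mark <;> by_cases eb : b == mark <;>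
          by_cases sa : a == " " <;> by_cases sb : b == " " <;>
          simp_all
    | a :: b :: c :: rest, _ =>
        have h0 : PySem.List.pyGet? (a::b::c::rest) (0:Int) = some a := by
          have h' : (0:Int) ≤ (rest.length:Int) + 1 + 1 := by omega
          simp [PySem.List.pyGet?, PySem.List.pyIdx?, h']
        have h1 : PySem.List.pyGet? (a::b::c::rest) (1:Int) = some b := by
          have h' : (0:Int) ≤ (rest.length:Int) + 1 := by omega
          simp [PySem.List.pyGet?, PySem.List.pyIdx?, h']
        have h2 : PySem.List.pyGet? (a::b::c::rest) (2:Int) = some c := by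
          have h' : (2:Int) ≤ (rest.length:Int) + 1 + 1 := by omega
          simp [PySem.List.pyGet?, PySem.List.pyIdx?, h']
        have h3 : ∀ cs : List String, pvScanB mark cs 3 = some [] := by
          intro cs; cases cs <;> simp [pvScanB]
        simp only [get_horizontal_coordinates, get_horizontal_coordinates_alt,
          pvALoop, pvCellA, hb, hr3, Option.bind_some, h0, h1, h2]
        simp only [pvScanB]
        by_cases ea : a == mark <;> by_cases eb : b == mark <;> by_cases ec : c == mark <;>
          by_cases sa : a == " " <;> by_cases sb : b == " " <;> by_cases sc : c == " " <;>
          simp only [ea, eb, ec, sa, sb, sc, Bool.or_self, Bool.or_true, Bool.or_false,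
            Bool.not_true, Bool.not_false, if_true, if_false, Bool.false_eq_true] <;>
          simp_all [h3]
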